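-- pv_equiv track=rewrite | github.com/sshah2/testingAIUI | scratch_6.py | preprocess_cobol_lines
-- ===== SOURCE A (Python) =====
-- def preprocess_cobol_lines(cobol_lines):
--     preprocessed_lines = []
--     procedure_division_found = False
--     for line in cobol_lines:
--         if 'PROCEDURE DIVISION.' in line:
--             procedure_division_found = True
--         if procedure_division_found:
--             if len(line) >= 7 and line[6] != '*':  # Exclude comment lines
--                 if line[6] == '-':  # Line continuation detected
--                     if preprocessed_lines:
--                         preprocessed_lines[-1] = preprocessed_lines[-1].rstrip() + ' ' + line[7:].lstrip()
--                 else: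
--                     preprocessed_lines.append(line[6:])  # Strip the first 6 characters
--     return preprocessed_lines
-- ===== SOURCE B (Python) =====
-- def preprocess_cobol_lines(cobol_lines):
--     # Staged pipeline: (1) find the suffix starting at the first PROCEDURE DIVISION line,
--     # (2) filter to non-comment lines of length >= 7, (3) group base lines with their
--     # continuation segments, (4) join each group into one logical line.
--     start = None
--     for i, line in enumerate(cobol_lines):
--         if 'PROCEDURE DIVISION.' in line:
--             start = i
--             break
--     if start is None:
--         return []
--     segs = [l for l in cobol_lines[start:] if len(l) >= 7 and l[6] != '*']
--     groups = []
--     for l in segs: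
--         if l[6] == '-':
--             if groups:
--                 groups[-1].append(l[7:].lstrip())
--         else:
--             groups.append([l[6:]])
--     out = []
--     for g in groups:
--         s = g[0]
--         for part in g[1:]:
--             s = s.rstrip() + ' ' + part
--         out.append(s)
--     return out
-- ===== Notes on version B (the rewrite author's own statement) =====
-- stated objective: alternative
-- what changed: B is a staged pipeline - find the PROCEDURE DIVISION suffix, filter out comments/short lines, group base lines with their continuation segments into lists, then join each group - instead of A's single flagged pass that appends and retroactively mutates the last output element.
import Mathlib
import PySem

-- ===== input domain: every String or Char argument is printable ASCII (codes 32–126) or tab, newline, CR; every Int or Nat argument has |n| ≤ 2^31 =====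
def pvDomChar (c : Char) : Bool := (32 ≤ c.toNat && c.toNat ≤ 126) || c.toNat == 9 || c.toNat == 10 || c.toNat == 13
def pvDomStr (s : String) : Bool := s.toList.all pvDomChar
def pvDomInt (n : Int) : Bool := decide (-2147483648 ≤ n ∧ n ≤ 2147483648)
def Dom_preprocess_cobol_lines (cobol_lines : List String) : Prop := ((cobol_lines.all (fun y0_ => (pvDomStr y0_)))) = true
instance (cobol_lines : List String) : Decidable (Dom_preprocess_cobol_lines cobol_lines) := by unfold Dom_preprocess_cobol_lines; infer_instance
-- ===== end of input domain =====

-- B is a staged pipeline (find suffix, filter, group segments, join groups) instead of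
-- A's single flagged pass that retro-edits the last output element; same cost, alternative structure.

-- ===== PORT A =====
-- state: (preprocessed_lines, procedure_division_found)
def pvAStep (st : List String × Bool) (line : String) : List String × Bool :=
  let found := if PySem.Str.isIn "PROCEDURE DIVISION." line then true else st.2
  if found then
    if (decide (7 ≤ PySem.Str.len line)) && (PySem.Str.pyGet? line 6 != some '*') then
      if PySem.Str.pyGet? line 6 == some '-' then
        if st.1.isEmpty then (st.1, found)
        else (st.1.dropLast ++
              [PySem.Str.rstrip (st.1.getLastD "") ++ " " ++
               PySem.Str.lstrip (PySem.Str.slice line (some 7) none)], found)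
      else (st.1 ++ [PySem.Str.slice line (some 6) none], found)
    else (st.1, found)
  else (st.1, found)

def preprocess_cobol_lines (cobol_lines : List String) : List String :=
  (cobol_lines.foldl pvAStep ([], false)).1

-- ===== PORT B =====
-- stage 1: suffix of the input starting at the first line containing 'PROCEDURE DIVISION.'
def pvFindStart (lines : List String) : Option (List String) :=
  match lines with
  | [] => none
  | l :: rest => if PySem.Str.isIn "PROCEDURE DIVISION." l then some (l :: rest)
                 else pvFindStart rest

-- stage 2 predicate: keep non-comment lines of length >= 7
def pvKeep (l : String) : Bool :=
  (decide (7 ≤ PySem.Str.len l)) && (PySem.Str.pyGet? l 6 != some '*')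

def pvIsCont (l : String) : Bool := PySem.Str.pyGet? l 6 == some '-'

-- stage 3: group base lines with their continuation segments
def pvGStep (groups : List (List String)) (l : String) : List (List String) :=
  if pvIsCont l then
    if groups.isEmpty then groups
    else groups.dropLast ++
         [groups.getLastD [] ++ [PySem.Str.lstrip (PySem.Str.slice l (some 7) none)]]
  else groups ++ [[PySem.Str.slice l (some 6) none]]

-- stage 4: join one group into a logical line
def pvJoin (g : List String) : String :=
  match g with
  | [] => ""
  | h :: t => t.foldl (fun s part => PySem.Str.rstrip s ++ " " ++ part) h

def preprocess_cobol_lines_alt (cobol_lines : List String) : List String :=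
  match pvFindStart cobol_lines with
  | none => []
  | some tail => (((tail.filter pvKeep).foldl pvGStep []).map pvJoin)

-- ===== PRECONDITION & SPEC =====
def Spec_preprocess_cobol_lines (cobol_lines : List String) (out : List String) : Prop := out = preprocess_cobol_lines_alt cobol_lines
instance (cobol_lines : List String) (out : List String) : Decidable (Spec_preprocess_cobol_lines cobol_lines out) := by unfold Spec_preprocess_cobol_lines; infer_instance

-- ===== CLAIM (what is proved, stated in full; the proofs are below) =====
def Claim_equal_preprocess_cobol_lines : Prop := ∀ (cobol_lines : List String), Dom_preprocess_cobol_lines cobol_lines → Spec_preprocess_cobol_lines cobol_lines (preprocess_cobol_lines cobol_lines)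

-- ===== LEMMAS AND PROOFS =====

-- A's step once the flag is set (found = true), as a function on the output list only
def pvStep2 (out : List String) (line : String) : List String :=
  if pvKeep line then
    if pvIsCont line then
      if out.isEmpty then out
      else out.dropLast ++
           [PySem.Str.rstrip (out.getLastD "") ++ " " ++
            PySem.Str.lstrip (PySem.Str.slice line (some 7) none)]
    else out ++ [PySem.Str.slice line (some 6) none]
  else out

theorem pvAStep_true (out : List String) (l : String) :
    pvAStep (out, true) l = (pvStep2 out l, true) := by
  simp only [pvAStep, pvStep2, pvKeep, pvIsCont]
  split_ifs <;> simp_all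

theorem pv_foldl_true (lines : List String) : ∀ out,
    lines.foldl pvAStep (out, true) = (lines.foldl pvStep2 out, true) := by
  induction lines with
  | nil => intro out; rfl
  | cons l rest ih =>
    intro out
    simp only [List.foldl_cons, pvAStep_true, ih]

-- A's fold equals: do nothing until the first match, then run pvStep2 from there
theorem pv_A_stage (lines : List String) :
    (lines.foldl pvAStep ([], false)).1 =
      (match pvFindStart lines with
       | none => []
       | some tail => tail.foldl pvStep2 []) := by
  induction lines with
  | nil => rfl
  | cons l rest ih =>
    simp only [pvFindStart, List.foldl_cons]
    by_cases hm : PySem.Str.isIn "PROCEDURE DIVISION." l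
    · simp only [hm, if_pos, List.foldl_cons]
      have h1 : pvAStep ([], false) l = (pvStep2 [] l, true) := by
        simp only [pvAStep, pvStep2, pvKeep, pvIsCont, hm]
        split_ifs <;> simp_all
      rw [h1, pv_foldl_true]
    · have hm' : PySem.Str.isIn "PROCEDURE DIVISION." l = false :=
        Bool.eq_false_iff.mpr hm
      have h0 : pvAStep ([], false) l = ([], false) := by
        simp only [pvAStep, hm', Bool.false_eq_true, if_false]
      simp only [hm, h0, ih]
      simp

-- pvStep2 over all lines = inner action over the kept lines only
theorem pv_filter_stage (lines : List String) : ∀ out,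
    lines.foldl pvStep2 out = (lines.filter pvKeep).foldl pvStep2 out := by
  induction lines with
  | nil => intro out; rfl
  | cons l rest ih =>
    intro out
    by_cases hk : pvKeep l
    · simp [hk, ih]
    · have : pvStep2 out l = out := by simp [pvStep2, hk]
      simp [hk, ih, this]

theorem pvJoin_concat (a : String) (t : List String) (part : String) :
    pvJoin (a :: (t ++ [part])) = PySem.Str.rstrip (pvJoin (a :: t)) ++ " " ++ part := by
  simp [pvJoin, List.foldl_append]

-- the joined groups track A's output list, one grouping step
theorem pv_join_step (groups : List (List String)) (l : String)
    (h : ∀ g ∈ groups, g ≠ []) (hk : pvKeep l = true) :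
    pvStep2 (groups.map pvJoin) l = (pvGStep groups l).map pvJoin ∧
    (∀ g ∈ pvGStep groups l, g ≠ []) := by
  unfold pvStep2 pvGStep
  by_cases hc : pvIsCont l
  · rcases List.eq_nil_or_concat groups with rfl | ⟨gs, g, rfl⟩
    · simp [hk, hc]
    · have hg : g ≠ [] := h g (by simp)
      obtain ⟨a, t, rfl⟩ := List.exists_cons_of_ne_nil hg
      refine ⟨?_, ?_⟩
      · simp [hk, hc, pvJoin_concat]
      · intro g hg2
        simp only [hc, if_true] at hg2
        rw [if_neg (by simp)] at hg2
        simp only [List.concat_eq_append, List.dropLast_concat, List.getLastD_concat] at hg2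
        rcases List.mem_append.mp hg2 with hmem | hmem
        · exact h g (by simp [List.concat_eq_append, hmem])
        · simp only [List.mem_singleton] at hmem
          subst hmem; simp
  · refine ⟨?_, ?_⟩
    · simp [hk, hc, pvJoin]
    · simp only [hc, Bool.false_eq_true, if_false]
      intro g hg2
      rcases List.mem_append.mp hg2 with hmem | hmem
      · exact h g hmem
      · simp only [List.mem_singleton] at hmem
        subst hmem; simp

theorem pv_join_stage (segs : List String) (hs : ∀ l ∈ segs, pvKeep l = true) :
    ∀ (groups : List (List String)), (∀ g ∈ groups, g ≠ []) →
    segs.foldl pvStep2 (groups.map pvJoin) = (segs.foldl pvGStep groups).map pvJoin := by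
  induction segs with
  | nil => intro groups h; simp
  | cons l rest ih =>
    intro groups h
    obtain ⟨h1, h2⟩ := pv_join_step groups l h (hs l (by simp))
    simp only [List.foldl_cons, h1]
    exact ih (fun x hx => hs x (by simp [hx])) _ h2

-- ===== VERDICT (by name: the statement is the Claim_ definition above) =====
theorem preprocess_cobol_lines_spec : Claim_equal_preprocess_cobol_lines := by
  intro cobol_lines _
  unfold Spec_preprocess_cobol_lines preprocess_cobol_lines preprocess_cobol_lines_alt
  rw [pv_A_stage]
  cases h : pvFindStart cobol_lines with
  | none => rfl
  | some tail =>
    have := pv_join_stage (tail.filter pvKeep)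
      (fun x hx => (List.mem_filter.mp hx).2) [] (by simp)
    simp only [List.map_nil] at this
    simp [pv_filter_stage, this]
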